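-- pv_equiv track=rewrite | github.com/JJGantt/mcp-data | mcp_server.py | _resolve_item
-- ===== SOURCE A (Python) =====
-- def _find_item(items: list, item_id: str) -> dict | None:
--     for i in items:
--         if i["id"] == item_id:
--             return i
--     return None
--
-- def _resolve_item(items: list, id_prefix: str) -> dict | None:
--     """Find an item by full ID or prefix match."""
--     item = _find_item(items, id_prefix)
--     if item:
--         return item
--     matches = [i for i in items if i["id"].startswith(id_prefix) and not i.get("deleted")]
--     if len(matches) == 1:
--         return matches[0]
--     return None
-- ===== SOURCE B (Python) =====
-- def _resolve_item(items: list, id_prefix: str) -> dict | None: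
--     """Find an item by full ID or unique prefix match (sort + binary search)."""
--     srt = sorted(items, key=lambda i: i["id"])
--     # leftmost index whose id is >= id_prefix (hand-rolled bisect_left)
--     lo, hi = 0, len(srt)
--     while lo < hi:
--         mid = (lo + hi) // 2
--         if srt[mid]["id"] < id_prefix:
--             lo = mid + 1
--         else:
--             hi = mid
--     if lo < len(srt) and srt[lo]["id"] == id_prefix:
--         return srt[lo]  # stable sort: first item in input order with this id
--     # ids starting with id_prefix form a contiguous block beginning at lo
--     matches = []
--     j = lo
--     while j < len(srt) and srt[j]["id"].startswith(id_prefix):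
--         if not srt[j].get("deleted"):
--             matches.append(srt[j])
--         j += 1
--     return matches[0] if len(matches) == 1 else None
-- ===== Notes on version B (the rewrite author's own statement) =====
-- stated objective: alternative
-- what changed: Replaces A's two linear scans (a find-by-id loop, then a filter comprehension) with sorting the items by id, a hand-rolled binary search for the leftmost id >= prefix (exact match test there, stable sort preserving A's first-in-input tie-break), and a walk over the contiguous block of prefix matches.
-- outside the precondition, e.g. on _resolve_item([{'id': 'id'}, {'deleted': 'x'}], 'id'): A returns {'id': 'id'}, B raises KeyError
import Mathlib
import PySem

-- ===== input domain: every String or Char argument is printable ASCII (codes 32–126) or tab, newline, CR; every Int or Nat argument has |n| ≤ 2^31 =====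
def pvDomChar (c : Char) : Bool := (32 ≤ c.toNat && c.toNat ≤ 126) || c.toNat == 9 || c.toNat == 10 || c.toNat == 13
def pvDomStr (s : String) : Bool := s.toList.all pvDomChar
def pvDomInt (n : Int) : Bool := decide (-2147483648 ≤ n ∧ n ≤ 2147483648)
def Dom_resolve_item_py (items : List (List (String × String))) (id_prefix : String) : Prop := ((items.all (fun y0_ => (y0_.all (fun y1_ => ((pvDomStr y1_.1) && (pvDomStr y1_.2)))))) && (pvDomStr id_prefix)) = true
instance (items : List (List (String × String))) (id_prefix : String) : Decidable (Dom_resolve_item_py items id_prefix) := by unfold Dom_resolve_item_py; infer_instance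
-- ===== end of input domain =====

-- B replaces A's two linear scans by sort-by-id + hand-rolled binary search + a walk over the
-- contiguous prefix block; return value only, no mutation. Not faster (sorting costs more than A's scans).

-- i["id"] (both Pythons); default "" is unreachable under Pre_ (every item has an "id" key)
def pvKey (i : List (String × String)) : String := (PySem.Dict.mk i).getD "id" ""

-- "not i.get('deleted')": with str values this is "key absent or empty string"
def pvNotDeleted (i : List (String × String)) : Bool :=
  match (PySem.Dict.mk i).get? "deleted" with
  | some s => s == ""
  | none => true

-- the comprehension's condition: i["id"].startswith(id_prefix) and not i.get("deleted")
def pvPrefOk (id_prefix : String) (i : List (String × String)) : Bool :=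
  PySem.Str.startswith (pvKey i) id_prefix && pvNotDeleted i

-- ===== PORT A =====
-- _find_item: scan for the first item with i["id"] == item_id
def pvFindItem (item_id : String) : List (List (String × String)) → Option (List (String × String))
  | [] => none
  | i :: rest => if pvKey i == item_id then some i else pvFindItem item_id rest

def resolve_item_py (items : List (List (String × String))) (id_prefix : String) : Option (List (String × String)) :=
  let item := pvFindItem id_prefix items
  -- 'if item:' — Python dict truthiness: found and nonempty
  if (match item with | some d => !d.isEmpty | none => false) then item
  else
    let ms := items.filter (pvPrefOk id_prefix)
    if ms.length == 1 then ms.head? else none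

-- ===== PORT B =====
-- the hand-rolled bisect_left loop of Source B: while lo < hi: mid=(lo+hi)//2; …
def pvBisect (srt : List (List (String × String))) (p : String) (lo hi : Nat) : Nat :=
  if _h : lo < hi then
    let mid := (lo + hi) / 2
    if pvKey (srt.getD mid []) < p then pvBisect srt p (mid + 1) hi
    else pvBisect srt p lo mid
  else lo
termination_by hi - lo
decreasing_by all_goals omega

-- the collecting while loop of Source B: while j < len(srt) and startswith: append if not deleted
def pvWalk (srt : List (List (String × String))) (p : String) (j : Nat)
    (acc : List (List (String × String))) : List (List (String × String)) :=
  if _h : j < srt.length then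
    let x := srt.getD j []
    if PySem.Str.startswith (pvKey x) p then
      pvWalk srt p (j + 1) (if pvNotDeleted x then acc ++ [x] else acc)
    else acc
  else acc
termination_by srt.length - j
decreasing_by omega

def resolve_item_py_alt (items : List (List (String × String))) (id_prefix : String) : Option (List (String × String)) :=
  let srt := PySem.List.sorted items pvKey false
  let lo := pvBisect srt id_prefix 0 srt.length
  if lo < srt.length && (pvKey (srt.getD lo []) == id_prefix) then some (srt.getD lo [])
  else
    let ms := pvWalk srt id_prefix lo []
    if ms.length == 1 then ms.head? else none

-- ===== PRECONDITION & SPEC =====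
-- Pre_ excludes lists containing an item without an "id" key: on those Python raises KeyError unless A's
-- find loop short-circuits at an earlier exact match, while B's sort key raises on every such list.
def Pre_resolve_item_py (items : List (List (String × String))) (id_prefix : String) : Prop :=
  ∀ i ∈ items, ((PySem.Dict.mk i).get? "id").isSome = true
instance (items : List (List (String × String))) (id_prefix : String) : Decidable (Pre_resolve_item_py items id_prefix) := by unfold Pre_resolve_item_py; infer_instance

def pvWitness_resolve_item_py : (List (List (String × String))) × String := ([[("id", "ab")], [("id", "a"), ("deleted", "x")]], "a")

def Spec_resolve_item_py (items : List (List (String × String))) (id_prefix : String) (out : Option (List (String × String))) : Prop := out = resolve_item_py_alt items id_prefix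
instance (items : List (List (String × String))) (id_prefix : String) (out : Option (List (String × String))) : Decidable (Spec_resolve_item_py items id_prefix out) := by unfold Spec_resolve_item_py; infer_instance

-- ===== CLAIM (what is proved, stated in full; the proofs are below) =====
def Claim_equal_resolve_item_py : Prop := ∀ (items : List (List (String × String))) (id_prefix : String), Dom_resolve_item_py items id_prefix → Pre_resolve_item_py items id_prefix → Spec_resolve_item_py items id_prefix (resolve_item_py items id_prefix)

-- ===== LEMMAS AND PROOFS =====

-- ---- string lexicographic facts (Python's str <, startswith) ----

lemma lex_append_not_lt : ∀ (p t : List Char), ¬ List.Lex (· < ·) (p ++ t) p := by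
  intro p
  induction p with
  | nil => intro t h; cases h
  | cons a q ih =>
    intro t h
    cases h with
    | cons h' => exact ih t h'
    | rel h' => exact lt_irrefl _ h'

lemma lex_append_of_lex_not_prefix : ∀ (p s : List Char), List.Lex (· < ·) p s → ¬ p <+: s →
    ∀ u, List.Lex (· < ·) (p ++ u) s := by
  intro p s h
  induction h with
  | nil => intro hnp u; exact absurd (List.nil_prefix) hnp
  | @cons a l₁ l₂ h' ih =>
    intro hnp u
    exact List.Lex.cons (ih (fun hp => hnp ((List.cons_prefix_cons).2 ⟨rfl, hp⟩)) u)
  | rel h' => intro _ u; exact List.Lex.rel h'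

-- a string never lexicographically precedes its own prefix
lemma pv_not_lt_of_startswith (s p : String) (h : PySem.Str.startswith s p = true) : ¬ s < p := by
  rw [PySem.Str.startswith_eq, PySem.Chars.startswith_iff] at h
  rw [String.lt_iff_toList_lt]
  obtain ⟨t, ht⟩ := h
  rw [← ht]
  exact lex_append_not_lt _ _

-- contiguity: past the first non-match >= p, nothing matches the prefix any more
lemma pv_contig (s t p : String) (hps : ¬ s < p) (hns : PySem.Str.startswith s p = false)
    (hst : s ≤ t) : PySem.Str.startswith t p = false := by
  by_contra h
  rw [Bool.not_eq_false, PySem.Str.startswith_eq, PySem.Chars.startswith_iff] at h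
  rw [PySem.Str.startswith_eq] at hns
  have hns' : ¬ p.toList <+: s.toList := by
    intro hp; rw [(PySem.Chars.startswith_iff _ _).2 hp] at hns; exact Bool.true_eq_false.mp hns
  have hlt : List.Lex (· < ·) p.toList s.toList := by
    have hle : p.toList ≤ s.toList := le_of_not_gt (fun hlt => hps ((String.lt_iff_toList_lt).2 hlt))
    rcases lt_or_eq_of_le hle with h' | h'
    · exact h'
    · exact absurd (h' ▸ List.prefix_refl _) hns'
  obtain ⟨u, hu⟩ := h
  have : List.Lex (· < ·) t.toList s.toList := hu ▸ lex_append_of_lex_not_prefix _ _ hlt hns' u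
  rw [String.le_iff_toList_le] at hst
  exact absurd this (not_lt_of_ge hst)


-- ---- A characterised ----
lemma pvFindItem_eq_head_filter (p : String) (xs : List (List (String × String))) :
    pvFindItem p xs = (xs.filter (fun i => pvKey i == p)).head? := by
  induction xs with
  | nil => rfl
  | cons x t ih =>
    by_cases h : pvKey x == p
    · simp [pvFindItem, h]
    · simp only [pvFindItem, h]
      simp [h, ih]

-- ---- stability of PySem's sorted: the key-p items keep their relative order ----
lemma pv_insertBy_filter (p : String) (x : List (String × String)) :
    ∀ (ys : List (List (String × String))), ys.Pairwise (fun a b => pvKey a ≤ pvKey b) →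
    (PySem.List.insertBy (fun a b => decide (pvKey a < pvKey b)) x ys).filter (fun i => pvKey i == p)
      = ys.filter (fun i => pvKey i == p) ++ if pvKey x == p then [x] else [] := by
  intro ys
  induction ys with
  | nil => intro _; by_cases hxp : pvKey x == p <;> simp [PySem.List.insertBy, hxp]
  | cons y t ih =>
    intro hpw
    by_cases hb : pvKey x < pvKey y
    · -- insert here: x :: y :: t
      have hrest : (y :: t).filter (fun i => pvKey i == p) = [] ∨ pvKey x ≠ p := by
        by_cases hxp : pvKey x = p
        · left
          rw [List.filter_eq_nil_iff]
          intro z hz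
          have hyz : pvKey y ≤ pvKey z := by
            rcases hz with _ | hz
            · exact le_refl _
            · exact (List.pairwise_cons.1 hpw).1 z (by assumption)
          simp only [beq_iff_eq]
          intro hzp
          exact absurd (lt_of_lt_of_le hb hyz) (by rw [hxp, hzp]; exact lt_irrefl _)
        · right; exact hxp
      have hins : PySem.List.insertBy (fun a b => decide (pvKey a < pvKey b)) x (y :: t)
          = x :: y :: t := by simp [PySem.List.insertBy, hb]
      rw [hins, List.filter_cons]
      rcases hrest with hnil | hne
      · rw [hnil]
        by_cases hxp : pvKey x == p <;> simp [hxp]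
      · have hxp : (pvKey x == p) = false := by simp [hne]
        rw [hxp]
        simp
    · -- skip y, recurse
      have : PySem.List.insertBy (fun a b => decide (pvKey a < pvKey b)) x (y :: t)
          = y :: PySem.List.insertBy (fun a b => decide (pvKey a < pvKey b)) x t := by
        simp [PySem.List.insertBy, hb]
      rw [this, List.filter_cons, ih (List.pairwise_cons.1 hpw).2, List.filter_cons]
      split <;> simp


lemma pv_sorted_filter (p : String) (xs : List (List (String × String))) :
    (PySem.List.sorted xs pvKey false).filter (fun i => pvKey i == p)
      = xs.filter (fun i => pvKey i == p) := by
  induction xs using List.reverseRecOn with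
  | nil => rfl
  | append_singleton xs x ih =>
    have hstep : PySem.List.sorted (xs ++ [x]) pvKey false
        = PySem.List.insertBy (fun a b => decide (pvKey a < pvKey b)) x (PySem.List.sorted xs pvKey false) := by
      rw [PySem.List.sorted_eq_foldl_insertBy, PySem.List.sorted_eq_foldl_insertBy, List.foldl_append]
      rfl
    rw [hstep, pv_insertBy_filter p x _ (PySem.List.sorted_pairwise xs pvKey), ih, List.filter_append]
    simp [List.filter_cons]


-- ---- first hit of a predicate, by index ----
lemma pv_head_filter {α : Type} (q : α → Bool) :
    ∀ (ys : List α) (lo : Nat) (hlo : lo < ys.length),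
    (∀ i (hi : i < ys.length), i < lo → q ys[i] = false) → q ys[lo] = true →
    (ys.filter q).head? = some ys[lo] := by
  intro ys
  induction ys with
  | nil => intro lo h; simp at h
  | cons y t ih =>
    intro lo hlo hbelow hq
    cases lo with
    | zero => simp at hq; simp [hq]
    | succ m =>
      have h0 : q y = false := hbelow 0 (by simp) (by omega)
      rw [List.filter_cons, h0]
      simp only [Bool.false_eq_true, if_false]
      have := ih m (by simpa using hlo)
        (fun i hi hilt => hbelow (i+1) (by simpa using hi) (by omega)) (by simpa using hq)
      simpa using this

-- ---- the binary search is bisect_left ----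
lemma pvBisect_spec (ys : List (List (String × String))) (p : String)
    (hmono : ∀ (i j : Nat) (hi : i < ys.length) (hj : j < ys.length), i ≤ j → pvKey ys[i] ≤ pvKey ys[j]) :
    ∀ (n lo hi : Nat), hi - lo ≤ n → lo ≤ hi → hi ≤ ys.length →
    (∀ i (hi' : i < ys.length), i < lo → pvKey ys[i] < p) →
    (∀ i (hi' : i < ys.length), hi ≤ i → p ≤ pvKey ys[i]) →
    pvBisect ys p lo hi ≤ ys.length ∧
      (∀ i (hi' : i < ys.length), i < pvBisect ys p lo hi → pvKey ys[i] < p) ∧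
      (∀ i (hi' : i < ys.length), pvBisect ys p lo hi ≤ i → p ≤ pvKey ys[i]) := by
  intro n
  induction n with
  | zero =>
    intro lo hi hn hle hlen hb ha
    have heq : lo = hi := by omega
    subst heq
    rw [pvBisect, dif_neg (lt_irrefl _)]
    exact ⟨by omega, hb, ha⟩
  | succ m ih =>
    intro lo hi hn hle hlen hb ha
    by_cases h : lo < hi
    · rw [pvBisect, dif_pos h]
      simp only
      have hmidlt : (lo + hi) / 2 < ys.length := by omega
      rw [List.getD_eq_getElem ys [] hmidlt]
      by_cases hc : pvKey ys[(lo+hi)/2] < p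
      · rw [if_pos hc]
        exact ih ((lo+hi)/2 + 1) hi (by omega) (by omega) hlen
          (fun i hi' hilt => lt_of_le_of_lt (hmono i ((lo+hi)/2) hi' hmidlt (by omega)) hc) ha
      · rw [if_neg hc]
        have hple : p ≤ pvKey ys[(lo+hi)/2] := le_of_not_gt hc
        exact ih lo ((lo+hi)/2) (by omega) (by omega) (by omega) hb
          (fun i hi' hgei => le_trans hple (hmono ((lo+hi)/2) i hmidlt hi' hgei))
    · rw [pvBisect, dif_neg h]
      have : lo = hi := by omega
      subst this
      exact ⟨by omega, hb, ha⟩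

-- ---- the walk collects exactly the prefix matches ----
lemma pvWalk_eq (srt : List (List (String × String))) (p : String) :
    ∀ (n j : Nat) (acc : List (List (String × String))), srt.length - j ≤ n →
    pvWalk srt p j acc
      = acc ++ ((srt.drop j).takeWhile (fun x => PySem.Str.startswith (pvKey x) p)).filter pvNotDeleted := by
  intro n
  induction n with
  | zero =>
    intro j acc hn
    rw [pvWalk, dif_neg (by omega)]
    rw [List.drop_eq_nil_of_le (by omega)]
    simp
  | succ m ih =>
    intro j acc hn
    by_cases hj : j < srt.length
    · rw [pvWalk, dif_pos hj]
      simp only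
      rw [List.getD_eq_getElem srt [] hj]
      have hdrop : srt.drop j = srt[j] :: srt.drop (j+1) := (List.getElem_cons_drop hj).symm
      by_cases hs : PySem.Str.startswith (pvKey srt[j]) p
      · rw [if_pos hs, ih (j+1) _ (by omega), hdrop, List.takeWhile_cons, if_pos hs, List.filter_cons]
        by_cases hd : pvNotDeleted srt[j] <;> simp [hd]
      · rw [if_neg hs, hdrop, List.takeWhile_cons, if_neg hs]
        simp
    · rw [pvWalk, dif_neg hj, List.drop_eq_nil_of_le (by omega)]
      simp

lemma pv_filter_eq_takeWhile (p : String) :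
    ∀ (ys : List (List (String × String))), ys.Pairwise (fun a b => pvKey a ≤ pvKey b) →
    (∀ y ∈ ys, ¬ pvKey y < p) →
    ys.filter (fun x => PySem.Str.startswith (pvKey x) p)
      = ys.takeWhile (fun x => PySem.Str.startswith (pvKey x) p) := by
  intro ys
  induction ys with
  | nil => intro _ _; rfl
  | cons y t ih =>
    intro hpw hge
    rw [List.filter_cons, List.takeWhile_cons]
    by_cases hs : PySem.Str.startswith (pvKey y) p
    · rw [if_pos hs, if_pos hs, ih (List.pairwise_cons.1 hpw).2 (fun z hz => hge z (by simp [hz]))]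
    · rw [if_neg hs, if_neg hs]
      rw [List.filter_eq_nil_iff]
      intro z hz
      have hyz : pvKey y ≤ pvKey z := (List.pairwise_cons.1 hpw).1 z hz
      rw [pv_contig (pvKey y) (pvKey z) p (hge y (by simp)) (by simpa using hs) hyz]
      simp

-- ===== VERDICT (by name: the statement is the Claim_ definition above) =====
lemma pv_main (items : List (List (String × String))) (p : String)
    (hpre : ∀ i ∈ items, ((PySem.Dict.mk i).get? "id").isSome = true) :
    resolve_item_py items p = resolve_item_py_alt items p := by
  unfold resolve_item_py resolve_item_py_alt
  simp only
  set srt := PySem.List.sorted items pvKey false with hsrt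
  have hperm : srt.Perm items := PySem.List.sorted_perm items pvKey false
  have hpw : srt.Pairwise (fun a b => pvKey a ≤ pvKey b) := PySem.List.sorted_pairwise items pvKey
  have hmono : ∀ (i j : Nat) (hi : i < srt.length) (hj : j < srt.length), i ≤ j →
      pvKey srt[i] ≤ pvKey srt[j] := by
    intro i j hi hj hij
    rcases Nat.lt_or_eq_of_le hij with h | h
    · exact (List.pairwise_iff_getElem.1 hpw) i j hi hj h
    · subst h; exact le_refl _
  obtain ⟨hloLen, hbelow, habove⟩ :=
    pvBisect_spec srt p hmono srt.length 0 srt.length (by omega) (by omega) (le_refl _)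
      (by omega) (fun i hi' h => by omega)
  set lo := pvBisect srt p 0 srt.length with hlo
  have hfind : pvFindItem p items = (srt.filter (fun i => pvKey i == p)).head? := by
    rw [pvFindItem_eq_head_filter, hsrt, pv_sorted_filter]
  by_cases hcond : lo < srt.length ∧ pvKey (srt.getD lo []) = p
  · -- exact match found
    obtain ⟨hlt, hkey⟩ := hcond
    rw [List.getD_eq_getElem srt [] hlt] at hkey
    have hhead : (srt.filter (fun i => pvKey i == p)).head? = some srt[lo] :=
      pv_head_filter _ srt lo hlt
        (fun i hi' hilt => by simp [ne_of_lt (hbelow i hi' hilt)]) (by simp [hkey])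
    have hmem : srt[lo] ∈ items := hperm.mem_iff.1 (List.getElem_mem hlt)
    have hne : srt[lo] ≠ [] := by
      intro he
      have := hpre _ hmem
      rw [he] at this
      simp [PySem.Dict.get?] at this
    rw [hfind, hhead]
    rw [if_pos (show (match some srt[lo] with | some d => !d.isEmpty | none => false) = true by
          simp [hne]),
        if_pos (show (decide (lo < srt.length) && (pvKey (srt.getD lo []) == p)) = true by
          simp [hlt, hkey]),
        List.getD_eq_getElem srt [] hlt]
  · -- no exact match anywhere
    have hnokey : ∀ x ∈ srt, (pvKey x == p) = false := by
      intro x hx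
      obtain ⟨j, hj, rfl⟩ := List.getElem_of_mem hx
      simp only [beq_eq_false_iff_ne, ne_eq]
      intro hkp
      by_cases hjlo : j < lo
      · exact absurd hkp (ne_of_lt (hbelow j hj hjlo))
      · have hlt : lo < srt.length := by omega
        have h1 : p ≤ pvKey srt[lo] := habove lo hlt (le_refl _)
        have h2 : pvKey srt[lo] ≤ pvKey srt[j] := hmono lo j hlt hj (by omega)
        exact hcond ⟨hlt, by rw [List.getD_eq_getElem srt [] hlt]; rw [hkp] at h2; exact le_antisymm h2 h1⟩
    have hnil : srt.filter (fun i => pvKey i == p) = [] :=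
      List.filter_eq_nil_iff.2 (fun x hx => by simp [hnokey x hx])
    have hcond' : (lo < srt.length && (pvKey (srt.getD lo []) == p)) = false := by
      by_cases h1 : lo < srt.length
      · simp only [h1, decide_true, Bool.true_and, beq_eq_false_iff_ne, ne_eq]
        exact fun h2 => hcond ⟨h1, h2⟩
      · simp [h1]
    rw [hfind, hnil, hcond']
    simp only [List.head?_nil, Bool.false_eq_true, if_false]
    -- both fall through to the prefix-match branch
    have hwalk : pvWalk srt p lo []
        = ((srt.drop lo).takeWhile (fun x => PySem.Str.startswith (pvKey x) p)).filter pvNotDeleted :=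
      pvWalk_eq srt p srt.length lo [] (by omega)
    have hdropge : ∀ y ∈ srt.drop lo, ¬ pvKey y < p := by
      intro y hy
      obtain ⟨k, hk, rfl⟩ := List.getElem_of_mem hy
      have hdl : (srt.drop lo).length = srt.length - lo := by simp
      have hk2 : lo + k < srt.length := by omega
      rw [List.getElem_drop]
      exact not_lt_of_ge (habove (lo + k) hk2 (by omega))
    have htw : (srt.drop lo).takeWhile (fun x => PySem.Str.startswith (pvKey x) p)
        = (srt.drop lo).filter (fun x => PySem.Str.startswith (pvKey x) p) :=
      (pv_filter_eq_takeWhile p (srt.drop lo) (hpw.sublist (List.drop_sublist _ _)) hdropge).symm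
    have htakenil : (srt.take lo).filter (pvPrefOk p) = [] := by
      rw [List.filter_eq_nil_iff]
      intro x hx
      obtain ⟨k, hk, rfl⟩ := List.getElem_of_mem hx
      have hts : (srt.take lo).length = min lo srt.length := by simp
      have hk' : k < lo := by omega
      have hklen : k < srt.length := by omega
      rw [List.getElem_take]
      have hlt := hbelow k hklen hk'
      unfold pvPrefOk
      simp only [Bool.and_eq_true, not_and]
      intro hs _
      exact absurd hlt (pv_not_lt_of_startswith _ _ hs)
    have hmsB : pvWalk srt p lo [] = srt.filter (pvPrefOk p) := by
      rw [hwalk, htw, List.filter_filter]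
      conv_rhs => rw [← List.take_append_drop lo srt]
      rw [List.filter_append, htakenil, List.nil_append]
      apply List.filter_congr
      intro x _
      unfold pvPrefOk
      exact Bool.and_comm _ _
    have hpermF : (srt.filter (pvPrefOk p)).Perm (items.filter (pvPrefOk p)) := hperm.filter _
    rw [hmsB]
    have hlen : (srt.filter (pvPrefOk p)).length = (items.filter (pvPrefOk p)).length := hpermF.length_eq
    by_cases h1 : (items.filter (pvPrefOk p)).length = 1
    · rw [if_pos (by simp [h1]), if_pos (by simp [hlen, h1])]
      obtain ⟨a, ha⟩ := List.length_eq_one_iff.1 (hlen.trans h1)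
      rw [ha]
      rw [ha] at hpermF
      rw [List.perm_singleton.1 hpermF.symm]
    · rw [if_neg (by simp [h1]), if_neg (by simp [hlen, h1])]

theorem resolve_item_py_spec : Claim_equal_resolve_item_py := by
  intro items p _ hpre
  exact pv_main items p hpre
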